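-- pv_equiv track=rewrite | github.com/Toni500github/oshot | scripts/icon_generator.py | create_filled_rectangle_pixels
-- ===== SOURCE A (Python) =====
-- def create_filled_rectangle_pixels(margin=5):
--     """White filled rectangle"""
--     size = 24
--     pixels = []
--
--     for y in range(size):
--         for x in range(size):
--             if margin <= x < size - margin and margin <= y < size - margin:
--                 pixels.extend([255, 255, 255, 255])
--             else:
--                 pixels.extend([0, 0, 0, 0])
--
--     return pixels
-- ===== SOURCE B (Python) =====
-- def create_filled_rectangle_pixels(margin=5):
--     """White filled rectangle"""
--     size = 24
--     interior_row = [c for x in range(size)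
--                     for c in ([255, 255, 255, 255] if margin <= x < size - margin
--                               else [0, 0, 0, 0])]
--     border_row = [0] * (4 * size)
--     pixels = []
--     for y in range(size):
--         pixels += interior_row if margin <= y < size - margin else border_row
--     return pixels
-- ===== Notes on version B (the rewrite author's own statement) =====
-- stated objective: alternative
-- what changed: Precomputes one interior row (running the column test once per column) and a constant all-zero border row, then assembles the image row by row, instead of re-testing the condition for every pixel in nested loops.
import Mathlib
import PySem

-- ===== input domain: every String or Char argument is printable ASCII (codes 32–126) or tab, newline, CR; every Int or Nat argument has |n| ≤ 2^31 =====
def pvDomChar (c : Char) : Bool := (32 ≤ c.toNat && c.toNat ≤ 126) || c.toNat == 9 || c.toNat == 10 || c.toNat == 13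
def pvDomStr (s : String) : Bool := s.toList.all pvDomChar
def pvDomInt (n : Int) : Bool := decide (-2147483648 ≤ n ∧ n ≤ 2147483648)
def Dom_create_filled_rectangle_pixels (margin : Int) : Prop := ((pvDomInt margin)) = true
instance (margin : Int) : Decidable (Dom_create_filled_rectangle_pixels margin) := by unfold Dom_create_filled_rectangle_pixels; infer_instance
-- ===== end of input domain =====

-- B precomputes one interior row and a constant border row, assembling the image row by row
-- instead of testing the condition per pixel (claimed equal on all Int margins; return value only).
-- ===== PORT A =====
def create_filled_rectangle_pixels (margin : Int) : List Int :=
  (PySem.List.pyRange 0 24 1).foldl (fun pixels y =>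
    (PySem.List.pyRange 0 24 1).foldl (fun pixels x =>
      if margin ≤ x ∧ x < 24 - margin ∧ (margin ≤ y ∧ y < 24 - margin) then
        pixels ++ [255, 255, 255, 255]
      else
        pixels ++ [0, 0, 0, 0]) pixels) []

-- ===== PORT B =====
-- interior_row: the column test run once per x, as a flattening comprehension
def pvInteriorRow (margin : Int) : List Int :=
  (PySem.List.pyRange 0 24 1).flatMap (fun x =>
    if margin ≤ x ∧ x < 24 - margin then [255, 255, 255, 255] else [0, 0, 0, 0])

-- border_row = [0] * (4 * size)
def pvBorderRow : List Int := List.replicate 96 0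

def create_filled_rectangle_pixels_alt (margin : Int) : List Int :=
  (PySem.List.pyRange 0 24 1).foldl (fun pixels y =>
    if margin ≤ y ∧ y < 24 - margin then
      pixels ++ pvInteriorRow margin
    else
      pixels ++ pvBorderRow) []

-- ===== PRECONDITION & SPEC =====
def Spec_create_filled_rectangle_pixels (margin : Int) (out : List Int) : Prop := out = create_filled_rectangle_pixels_alt margin
instance (margin : Int) (out : List Int) : Decidable (Spec_create_filled_rectangle_pixels margin out) := by unfold Spec_create_filled_rectangle_pixels; infer_instance

-- ===== CLAIM (what is proved, stated in full; the proofs are below) =====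
def Claim_equal_create_filled_rectangle_pixels : Prop := ∀ (margin : Int), Dom_create_filled_rectangle_pixels margin → Spec_create_filled_rectangle_pixels margin (create_filled_rectangle_pixels margin)

-- ===== LEMMAS AND PROOFS =====

-- Loop shape: 'if c: r += u else: r += v' as a flatMap over the range.
theorem pvFoldlIte {c : Int → Prop} [DecidablePred c] (u v : List Int) (l acc : List Int) :
    l.foldl (fun r x => if c x then r ++ u else r ++ v) acc
      = acc ++ l.flatMap (fun x => if c x then u else v) := by
  rw [PySem.List.foldl_congr_mem l _ (fun r x => r ++ if c x then u else v) acc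
      (fun r x _ => by by_cases h : c x <;> simp [h])]
  exact PySem.List.foldl_append_eq_flatMap _ _ _

theorem pvA_flatMap (margin : Int) :
    create_filled_rectangle_pixels margin =
      (PySem.List.pyRange 0 24 1).flatMap (fun y =>
        (PySem.List.pyRange 0 24 1).flatMap (fun x =>
          if margin ≤ x ∧ x < 24 - margin ∧ (margin ≤ y ∧ y < 24 - margin) then
            [255, 255, 255, 255] else [0, 0, 0, 0])) := by
  unfold create_filled_rectangle_pixels
  rw [PySem.List.foldl_congr_mem _ _ (fun pixels y => pixels ++
      (PySem.List.pyRange 0 24 1).flatMap (fun x =>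
        if margin ≤ x ∧ x < 24 - margin ∧ (margin ≤ y ∧ y < 24 - margin) then
          [255, 255, 255, 255] else [0, 0, 0, 0])) []
      (fun acc y _ => pvFoldlIte _ _ _ _)]
  rw [PySem.List.foldl_append_eq_flatMap]
  simp

theorem pvB_flatMap (margin : Int) :
    create_filled_rectangle_pixels_alt margin =
      (PySem.List.pyRange 0 24 1).flatMap (fun y =>
        if margin ≤ y ∧ y < 24 - margin then pvInteriorRow margin else pvBorderRow) := by
  unfold create_filled_rectangle_pixels_alt
  rw [pvFoldlIte (pvInteriorRow margin) pvBorderRow _ []]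
  simp

-- ===== VERDICT (by name: the statement is the Claim_ definition above) =====
theorem create_filled_rectangle_pixels_spec : Claim_equal_create_filled_rectangle_pixels := by
  intro margin _
  show create_filled_rectangle_pixels margin = create_filled_rectangle_pixels_alt margin
  rw [pvA_flatMap, pvB_flatMap]
  apply List.flatMap_congr
  intro y _
  by_cases hy : margin ≤ y ∧ y < 24 - margin
  · rw [if_pos hy]; unfold pvInteriorRow
    apply List.flatMap_congr
    intro x _
    by_cases hx : margin ≤ x ∧ x < 24 - margin
    · rw [if_pos ⟨hx.1, hx.2, hy⟩, if_pos hx]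
    · rw [if_neg (by tauto), if_neg hx]
  · rw [if_neg hy]
    have hrow : ∀ x : Int,
        (if margin ≤ x ∧ x < 24 - margin ∧ (margin ≤ y ∧ y < 24 - margin) then
          ([255, 255, 255, 255] : List Int) else [0, 0, 0, 0]) = [0, 0, 0, 0] := by
      intro x; rw [if_neg (by tauto)]
    calc (PySem.List.pyRange 0 24 1).flatMap (fun x =>
          if margin ≤ x ∧ x < 24 - margin ∧ (margin ≤ y ∧ y < 24 - margin) then
            [255, 255, 255, 255] else [0, 0, 0, 0])
        = (PySem.List.pyRange 0 24 1).flatMap (fun _ => ([0, 0, 0, 0] : List Int)) := by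
          exact List.flatMap_congr (fun x _ => hrow x)
      _ = pvBorderRow := by decide
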